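-- pv_equiv track=rewrite | github.com/pypi-data/pypi-mirror-96 | packages/magicstr/magicstr-3.78-py3-none-any.whl/magicstr/magicstr.py | escape_check
-- ===== SOURCE A (Python) =====
-- def escape_check(input_str):
--
--     ### 0. 'true' and 'false' will transform into 'TRUE' and 'FALSE' automatically in google sheet.
--     if(input_str == '-true-'):
--         return 'true'
--     elif(input_str == '-false-'):
--         return 'false'
--
--     ### 1. single ['] and ["] should be escaped.
--     ### chr(92) = '\'
--     block = input_str.split("'")
--     input_str = block[0]
--     for i in range(1, len(block)):
--         if(len(input_str) == 0 or input_str[-1] != chr(92)):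
--             input_str += chr(92)
--         input_str += "'" + block[i]
--
--     block = input_str.split('"')
--     input_str = block[0]
--     for i in range(1, len(block)):
--         if(len(input_str) == 0 or input_str[-1] != chr(92)):
--             input_str += chr(92)
--         input_str += '"' + block[i]
--
--     return input_str
-- ===== SOURCE B (Python) =====
-- def escape_check(input_str):
--     # same two literal guards as the original
--     if input_str == '-true-':
--         return 'true'
--     if input_str == '-false-':
--         return 'false'
--     # single left-to-right scan: escape a quote unless the previous input
--     # character is a backslash (chr(92))
--     out = []
--     prev = None
--     for ch in input_str:
--         if ch in ("'", '"') and prev != chr(92):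
--             out.append(chr(92))
--         out.append(ch)
--         prev = ch
--     return ''.join(out)
-- ===== Notes on version B (the rewrite author's own statement) =====
-- stated objective: simpler
-- what changed: Replaced A's two sequential split-on-quote/rebuild passes (split, then a loop re-joining blocks with conditional backslashes, done once for ' and once for ") by a single left-to-right character scan that remembers the previous character and inserts a backslash before an unescaped quote.
import Mathlib
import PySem

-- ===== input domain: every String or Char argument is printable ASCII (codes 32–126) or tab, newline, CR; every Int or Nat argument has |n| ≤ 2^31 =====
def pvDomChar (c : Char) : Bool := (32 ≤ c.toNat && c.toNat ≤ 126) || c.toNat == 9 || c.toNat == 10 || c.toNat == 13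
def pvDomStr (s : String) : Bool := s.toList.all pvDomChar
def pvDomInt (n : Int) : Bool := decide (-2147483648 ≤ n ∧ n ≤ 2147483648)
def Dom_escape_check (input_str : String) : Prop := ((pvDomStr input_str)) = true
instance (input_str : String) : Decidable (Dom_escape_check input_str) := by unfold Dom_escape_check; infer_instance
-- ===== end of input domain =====

-- B replaces A's two sequential split/rebuild passes by one character scan that
-- remembers the previous character (objective: simpler, one pass instead of two).

-- ===== PORT A =====
-- one split-then-rebuild pass of A: block = cur.split(q); cur = block[0];
-- for i in range(1, len(block)): if len(cur)==0 or cur[-1] != chr(92): cur += chr(92); cur += q + block[i]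
def escapePassA (q : Char) (cur : List Char) : List Char :=
  let block := PySem.Chars.splitOn cur [q]
  (PySem.List.pyRange 1 (block.length : Int) 1).foldl
    (fun acc i =>
      let acc := if acc.length = 0 ∨ PySem.List.pyGet? acc (-1) ≠ some '\\' then acc ++ ['\\'] else acc
      acc ++ [q] ++ PySem.List.pyGetD block i [])
    (PySem.List.pyGetD block 0 [])

def escape_check (input_str : String) : String :=
  if input_str = "-true-" then "true"
  else if input_str = "-false-" then "false"
  else
    let s1 := escapePassA '\'' input_str.toList
    let s2 := escapePassA '"' s1
    String.ofList s2

-- ===== PORT B =====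
def escape_check_alt (input_str : String) : String :=
  if input_str = "-true-" then "true"
  else if input_str = "-false-" then "false"
  else
    let r := input_str.toList.foldl
      (fun (st : List Char × Option Char) ch =>
        let out := if (ch = '\'' ∨ ch = '"') ∧ st.2 ≠ some '\\' then st.1 ++ ['\\'] else st.1
        (out ++ [ch], some ch))
      ([], none)
    String.ofList r.1

-- ===== PRECONDITION & SPEC =====
def Spec_escape_check (input_str : String) (out : String) : Prop := out = escape_check_alt input_str
instance (input_str : String) (out : String) : Decidable (Spec_escape_check input_str out) := by unfold Spec_escape_check; infer_instance

-- ===== CLAIM (what is proved, stated in full; the proofs are below) =====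
def Claim_equal_escape_check : Prop := ∀ (input_str : String), Dom_escape_check input_str → Spec_escape_check input_str (escape_check input_str)

-- ===== LEMMAS AND PROOFS =====

-- proof-side model of splitting on a single character: (first block, remaining blocks)
def split1 (q : Char) : List Char → List Char × List (List Char)
  | [] => ([], [])
  | c :: rest =>
    let p := split1 q rest
    if c = q then ([], p.1 :: p.2) else (c :: p.1, p.2)

-- canonical one-quote scanner (prev = previous input character)
def escOne (q : Char) : Option Char → List Char → List Char
  | _, [] => []
  | prev, c :: rest =>
    (if c = q ∧ prev ≠ some '\\' then ['\\', c] else [c]) ++ escOne q (some c) rest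

-- canonical two-quote scanner
def escBoth : Option Char → List Char → List Char
  | _, [] => []
  | prev, c :: rest =>
    (if (c = '\'' ∨ c = '"') ∧ prev ≠ some '\\' then ['\\', c] else [c]) ++ escBoth (some c) rest

theorem splitOn_go_single (q : Char) (fuel : Nat) (l cur : List Char)
    (acc : List (List Char)) (h : l.length ≤ fuel) :
    PySem.Chars.splitOn.go [q] fuel l cur acc =
      acc.reverse ++ (cur.reverse ++ (split1 q l).1) :: (split1 q l).2 := by
  induction l generalizing fuel cur acc with
  | nil =>
    cases fuel <;> simp [PySem.Chars.splitOn.go, split1]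
  | cons c rest ih =>
    cases fuel with
    | zero => simp at h
    | succ fuel =>
      rw [PySem.Chars.splitOn.go]
      by_cases hc : c = q
      · subst hc
        simp only [split1, List.isPrefixOf, ]
        have : (c :: rest).drop 1 = rest := rfl
        simp only [List.length_cons] at h
        rw [if_pos (by simp)]
        simp only [List.length_singleton, List.drop_succ_cons, List.drop_zero]
        rw [ih fuel [] ((cur.reverse) :: acc) (by omega)]
        simp
      · have hpre : [q].isPrefixOf (c :: rest) = false := by
          simp [List.isPrefixOf]
          exact fun h' => hc h'.symm
        rw [if_neg (by simp [hpre])]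
        simp only [List.length_cons] at h
        rw [ih fuel (c :: cur) acc (by omega)]
        simp [split1, hc]

theorem splitOn_single (q : Char) (s : List Char) :
    PySem.Chars.splitOn s [q] = (split1 q s).1 :: (split1 q s).2 := by
  have := splitOn_go_single q (s.length + 1) s [] [] (by omega)
  simpa [PySem.Chars.splitOn] using this

def stepA (q : Char) (acc b : List Char) : List Char :=
  (if acc.getLast? = some '\\' then acc else acc ++ ['\\']) ++ [q] ++ b

theorem condA (a : List Char) :
    (if a.length = 0 ∨ PySem.List.pyGet? a (-1) ≠ some '\\' then a ++ ['\\'] else a)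
    = if a.getLast? = some '\\' then a else a ++ ['\\'] := by
  rw [PySem.List.pyGet?_neg_one]
  rcases eq_or_ne a.getLast? (some '\\') with h | h
  · have hne : a.length ≠ 0 := by
      intro h0
      rw [List.length_eq_zero_iff] at h0
      subst h0
      simp at h
    rw [if_neg (by simp [hne, h]), if_pos h]
  · rw [if_pos (Or.inr h), if_neg h]

theorem foldA_eq (q : Char) (s : List Char) : ∀ (acc : List Char),
    List.foldl (stepA q) (acc ++ (split1 q s).1) (split1 q s).2
    = acc ++ escOne q acc.getLast? s := by
  induction s with
  | nil => intro acc; simp [split1, escOne]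
  | cons c rest ih =>
    intro acc
    rcases eq_or_ne c q with hc | hc
    · subst hc
      have hsp : split1 c (c :: rest) = ([], (split1 c rest).1 :: (split1 c rest).2) := by
        simp [split1]
      rw [hsp]
      simp only [List.append_nil, List.foldl_cons]
      rcases eq_or_ne acc.getLast? (some '\\') with h | h
      · have hstep : stepA c acc (split1 c rest).1 = (acc ++ [c]) ++ (split1 c rest).1 := by
          simp [stepA, h]
        rw [hstep, ih (acc ++ [c])]
        simp [escOne, h]
      · have hstep : stepA c acc (split1 c rest).1 = (acc ++ ['\\', c]) ++ (split1 c rest).1 := by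
          simp [stepA, h]
        rw [hstep, ih (acc ++ ['\\', c])]
        simp [escOne, h]
    · have hsp : split1 q (c :: rest) = (c :: (split1 q rest).1, (split1 q rest).2) := by
        simp [split1, hc]
      rw [hsp]
      rw [show acc ++ (c :: (split1 q rest).1, (split1 q rest).2).1
            = (acc ++ [c]) ++ (split1 q rest).1 by simp]
      rw [ih (acc ++ [c])]
      simp [escOne, hc]

theorem pass_fold_eq (q : Char) (s acc : List Char) :
    List.foldl
      (fun acc b =>
        (if acc.length = 0 ∨ PySem.List.pyGet? acc (-1) ≠ some '\\' then acc ++ ['\\'] else acc) ++ [q] ++ b)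
      (acc ++ (split1 q s).1) (split1 q s).2
    = acc ++ escOne q acc.getLast? s := by
  simp only [condA]
  exact foldA_eq q s acc

theorem escapePassA_eq (q : Char) (s : List Char) :
    escapePassA q s = escOne q none s := by
  unfold escapePassA
  rw [splitOn_single]
  rw [PySem.List.foldl_pyRange_pyGetD' ((split1 q s).1 :: (split1 q s).2) []
      (fun acc b =>
        (if acc.length = 0 ∨ PySem.List.pyGet? acc (-1) ≠ some '\\' then acc ++ ['\\'] else acc) ++ [q] ++ b)
      (PySem.List.pyGetD ((split1 q s).1 :: (split1 q s).2) 0 []) (by norm_num)]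
  simp only [PySem.List.pyGetD_zero_cons, Int.toNat_one, List.drop_one, List.tail_cons]
  have := pass_fold_eq q s []
  simpa using this

theorem escOne_comp (s : List Char) (prev : Option Char) :
    escOne '"' prev (escOne '\'' prev s) = escBoth prev s := by
  induction s generalizing prev with
  | nil => simp [escOne, escBoth]
  | cons c rest ih =>
    rcases eq_or_ne c '\'' with hc | hc
    · subst hc
      rcases eq_or_ne prev (some '\\') with h | h
      · simp [escOne, escBoth, h, ih]
      · simp [escOne, escBoth, h, ih]
    · rcases eq_or_ne c '"' with hc2 | hc2
      · subst hc2
        rcases eq_or_ne prev (some '\\') with h | h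
        · simp [escOne, escBoth, h, ih]
        · simp [escOne, escBoth, h, ih]
      · simp [escOne, escBoth, hc, hc2, ih]

theorem bfold_eq (s acc : List Char) (prev : Option Char) :
    List.foldl
      (fun (st : List Char × Option Char) ch =>
        let out := if (ch = '\'' ∨ ch = '"') ∧ st.2 ≠ some '\\' then st.1 ++ ['\\'] else st.1
        (out ++ [ch], some ch))
      (acc, prev) s
    = (acc ++ escBoth prev s, List.foldl (fun _ c => some c) prev s) := by
  induction s generalizing acc prev with
  | nil => simp [escBoth]
  | cons c rest ih =>
    simp only [List.foldl_cons]
    rw [ih]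
    rcases eq_or_ne prev (some '\\') with h | h
    · simp [escBoth, h]
    · by_cases hq : c = '\'' ∨ c = '"'
      · simp [escBoth, h, hq]
      · simp [escBoth, h, hq]

-- ===== VERDICT (by name: the statement is the Claim_ definition above) =====
theorem escape_check_spec : Claim_equal_escape_check := by
  intro input_str _
  unfold Spec_escape_check escape_check escape_check_alt
  split_ifs with h1 h2
  · rfl
  · rfl
  · simp only []
    rw [escapePassA_eq, escapePassA_eq, escOne_comp, bfold_eq]
    simp
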